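-- pv_equiv track=rewrite | github.com/SeongUk18/codetree-TILs | 250305/등차수열/arithmetic-sequence.py | max_arithmetic_sequences
-- ===== SOURCE A (Python) =====
-- from itertools import combinations
--
-- def max_arithmetic_sequences(arr):
--     n = len(arr)
--     max_count = 0
--
--     for i, j in combinations(range(n), 2):
--         ai, aj = arr[i], arr[j]
--         if (ai + aj) % 2 != 0:
--             continue
--
--         K = (ai + aj) // 2
--         count = 0
--
--         for x, y in combinations(range(n), 2):
--             ax, ay = arr[x], arr[y]
--             if (ax + ay) // 2 == K and (ax + ay) % 2 == 0:
--                 count += 1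
--
--         max_count = max(max_count, count)
--
--     return max_count
-- ===== SOURCE B (Python) =====
-- def max_arithmetic_sequences(arr):
--     n = len(arr)
--     freq = {}
--     best = 0
--     for i in range(n):
--         for j in range(i + 1, n):
--             s = arr[i] + arr[j]
--             if s % 2 == 0:
--                 c = freq.get(s, 0) + 1
--                 freq[s] = c
--                 if c > best:
--                     best = c
--     return best
-- ===== Notes on version B (the rewrite author's own statement) =====
-- stated objective: faster
-- what changed: Instead of recomputing, for every even-sum pair, a full scan over all pairs counting those with the same average (four nested index loops), B makes a single pass over the pairs, counting pair-sum frequencies in a dict and tracking the running maximum count among even sums.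
import Mathlib
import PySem

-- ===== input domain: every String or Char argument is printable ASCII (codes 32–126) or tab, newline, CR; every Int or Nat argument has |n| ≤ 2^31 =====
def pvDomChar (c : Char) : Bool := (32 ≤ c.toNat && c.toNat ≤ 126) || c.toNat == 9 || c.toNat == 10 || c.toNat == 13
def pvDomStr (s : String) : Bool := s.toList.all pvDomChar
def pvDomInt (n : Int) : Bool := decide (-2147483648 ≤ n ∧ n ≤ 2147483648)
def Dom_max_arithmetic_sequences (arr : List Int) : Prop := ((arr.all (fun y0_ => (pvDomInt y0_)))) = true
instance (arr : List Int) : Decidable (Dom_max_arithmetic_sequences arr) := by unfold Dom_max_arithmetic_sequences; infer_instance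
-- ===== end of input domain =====

-- B replaces A's per-pair rescan of all pairs (O(n^4)) by one pass over the pairs with a
-- dict of pair-sum frequencies and a running maximum (O(n^2)); same return value everywhere.

-- ===== PORT A =====
-- itertools.combinations(range(n), 2): the index pairs (i, j) with i < j, in lexicographic order
def pvPairs (n : Int) : List (Int × Int) :=
  (PySem.List.pyRange 0 n 1).flatMap (fun i =>
    (PySem.List.pyRange (i + 1) n 1).map (fun j => (i, j)))

def max_arithmetic_sequences (arr : List Int) : Int :=
  let n := PySem.List.len arr
  (pvPairs n).foldl (fun max_count ij =>
    -- indices come from range(n), so arr[i] never raises; pyGetD is exact here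
    let ai := PySem.List.pyGetD arr ij.1 0
    let aj := PySem.List.pyGetD arr ij.2 0
    if PySem.Int.mod (ai + aj) 2 ≠ 0 then max_count
    else
      let K := PySem.Int.floordiv (ai + aj) 2
      let count := (pvPairs n).foldl (fun count xy =>
        let ax := PySem.List.pyGetD arr xy.1 0
        let ay := PySem.List.pyGetD arr xy.2 0
        if PySem.Int.floordiv (ax + ay) 2 = K ∧ PySem.Int.mod (ax + ay) 2 = 0 then count + 1
        else count) 0
      max max_count count) 0

-- ===== PORT B =====
-- body of B's inner loop: bump the dict count of s and the running best
def pvUpd (st : PySem.Dict Int Int × Int) (s : Int) : PySem.Dict Int Int × Int :=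
  let c := st.1.getD s 0 + 1
  (st.1.insert s c, if c > st.2 then c else st.2)

def pvBStep (arr : List Int) (st : PySem.Dict Int Int × Int) (i j : Int) :
    PySem.Dict Int Int × Int :=
  let s := PySem.List.pyGetD arr i 0 + PySem.List.pyGetD arr j 0
  if PySem.Int.mod s 2 = 0 then pvUpd st s else st

def max_arithmetic_sequences_alt (arr : List Int) : Int :=
  let n := PySem.List.len arr
  ((PySem.List.pyRange 0 n 1).foldl (fun st i =>
      (PySem.List.pyRange (i + 1) n 1).foldl (fun st j => pvBStep arr st i j) st)
    ((PySem.Dict.empty : PySem.Dict Int Int), 0)).2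

-- ===== PRECONDITION & SPEC =====
def Spec_max_arithmetic_sequences (arr : List Int) (out : Int) : Prop := out = max_arithmetic_sequences_alt arr
instance (arr : List Int) (out : Int) : Decidable (Spec_max_arithmetic_sequences arr out) := by unfold Spec_max_arithmetic_sequences; infer_instance

-- ===== CLAIM (what is proved, stated in full; the proofs are below) =====
def Claim_equal_max_arithmetic_sequences : Prop := ∀ (arr : List Int), Dom_max_arithmetic_sequences arr → Spec_max_arithmetic_sequences arr (max_arithmetic_sequences arr)

-- ===== LEMMAS AND PROOFS =====

-- the multiset both programs really work on: the pair sums, and the even ones among them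
def pvSum (arr : List Int) (ij : Int × Int) : Int :=
  PySem.List.pyGetD arr ij.1 0 + PySem.List.pyGetD arr ij.2 0

def pvSums (arr : List Int) : List Int := (pvPairs (PySem.List.len arr)).map (pvSum arr)

def pvEvens (arr : List Int) : List Int :=
  (pvSums arr).filter (fun s => PySem.Int.mod s 2 == 0)

-- the common normal form: running maximum of C over a list
def pvMF (C : Int → Int) (l : List Int) (b : Int) : Int :=
  l.foldl (fun a v => max a (C v)) b

lemma pvMF_max_out (C : Int → Int) (l : List Int) (b x : Int) :
    pvMF C l (max b x) = max (pvMF C l b) x := by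
  induction l generalizing b with
  | nil => rfl
  | cons u l ih =>
      simp only [pvMF, List.foldl_cons] at *
      rw [max_right_comm, ih]

lemma pvMF_le_of_mem (C : Int → Int) (l : List Int) (b v : Int) (h : v ∈ l) :
    C v ≤ pvMF C l b := by
  induction l generalizing b with
  | nil => cases h
  | cons u l ih =>
      simp only [pvMF, List.foldl_cons]
      rcases List.mem_cons.mp h with rfl | hv
      · have := pvMF_max_out C l b (C v)
        simp only [pvMF] at this
        rw [this]; exact le_max_right _ _
      · exact ih _ hv

-- counting fold = countP
lemma pvCount_fold (l : List Int) (p : Int → Bool) (b : Int) :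
    l.foldl (fun c u => if p u then c + 1 else c) b = b + (l.countP p : Int) := by
  induction l generalizing b with
  | nil => simp
  | cons u l ih =>
      by_cases h : p u
      · simp [h, ih]; omega
      · simp [h, ih]

-- Python: (u // 2 == s // 2 and u % 2 == 0)  ↔  u = s, when s is even
lemma pvCond_iff (s u : Int) (hs : PySem.Int.mod s 2 = 0) :
    (PySem.Int.floordiv u 2 = PySem.Int.floordiv s 2 ∧ PySem.Int.mod u 2 = 0) ↔ u = s := by
  rw [show PySem.Int.mod u 2 = u % 2 from PySem.Int.mod_eq_emod_of_pos (by norm_num),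
      show PySem.Int.floordiv u 2 = u / 2 from PySem.Int.floordiv_eq_ediv_of_pos (by norm_num),
      show PySem.Int.floordiv s 2 = s / 2 from PySem.Int.floordiv_eq_ediv_of_pos (by norm_num)]
  rw [show PySem.Int.mod s 2 = s % 2 from PySem.Int.mod_eq_emod_of_pos (by norm_num)] at hs
  omega

-- A computes the running maximum of the total even-sum multiplicities
lemma pvA_eq (arr : List Int) :
    max_arithmetic_sequences arr
      = pvMF (fun v => ((pvEvens arr).count v : Int)) (pvEvens arr) 0 := by
  have h1 : max_arithmetic_sequences arr
      = (pvSums arr).foldl (fun mc s =>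
          if PySem.Int.mod s 2 ≠ 0 then mc
          else max mc ((pvSums arr).foldl (fun c u =>
            if PySem.Int.floordiv u 2 = PySem.Int.floordiv s 2 ∧ PySem.Int.mod u 2 = 0
            then c + 1 else c) 0)) 0 := by
    simp only [max_arithmetic_sequences, pvSums, pvSum, List.foldl_map]
    rfl
  rw [h1]
  have h2 : ∀ (mc s : Int),
      (if PySem.Int.mod s 2 ≠ 0 then mc
       else max mc ((pvSums arr).foldl (fun c u =>
         if PySem.Int.floordiv u 2 = PySem.Int.floordiv s 2 ∧ PySem.Int.mod u 2 = 0
         then c + 1 else c) 0))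
      = (if (PySem.Int.mod s 2 == 0) then max mc (((pvEvens arr).count s : Int)) else mc) := by
    intro mc s
    by_cases hs : PySem.Int.mod s 2 = 0
    · have hc : ∀ u, (PySem.Int.floordiv u 2 = PySem.Int.floordiv s 2 ∧ PySem.Int.mod u 2 = 0)
          ↔ u = s := fun u => pvCond_iff s u hs
      have hs' : (2 : Int) ∣ s := (PySem.Int.mod_eq_zero_iff_dvd s 2).mp hs
      have hcnt : (pvSums arr).foldl (fun c u =>
          if PySem.Int.floordiv u 2 = PySem.Int.floordiv s 2 ∧ PySem.Int.mod u 2 = 0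
          then c + 1 else c) 0
          = ((pvEvens arr).count s : Int) := by
        have hf := pvCount_fold (pvSums arr)
          (fun u => decide (PySem.Int.floordiv u 2 = PySem.Int.floordiv s 2 ∧ PySem.Int.mod u 2 = 0)) 0
        simp only [decide_eq_true_eq] at hf
        rw [hf, zero_add]
        congr 1
        rw [pvEvens, List.count_eq_countP, List.countP_filter]
        apply List.countP_congr
        intro u _
        by_cases h : u = s
        · simp [h, hs']
        · have hcu := hc u
          rw [show PySem.Int.floordiv u 2 = u / 2 from PySem.Int.floordiv_eq_ediv_of_pos (by norm_num),
              show PySem.Int.floordiv s 2 = s / 2 from PySem.Int.floordiv_eq_ediv_of_pos (by norm_num),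
              show PySem.Int.mod u 2 = u % 2 from PySem.Int.mod_eq_emod_of_pos (by norm_num)] at hcu
          simp [h]
          omega
      rw [hcnt, if_neg (not_not_intro hs), if_pos (beq_iff_eq.mpr hs)]
    · rw [if_pos hs, if_neg]
      simpa using hs
  simp only [h2]
  have h3 : (pvSums arr).foldl (fun mc s =>
      if (PySem.Int.mod s 2 == 0) then max mc (((pvEvens arr).count s : Int)) else mc) 0
      = (pvEvens arr).foldl (fun mc s => max mc (((pvEvens arr).count s : Int))) 0 := by
    rw [pvEvens, List.foldl_filter]
  rw [h3]; rfl

-- the dict pass: with the dict holding the multiplicities of t, the running best ends at the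
-- running maximum of the multiplicities in t ++ l
lemma pvRun (l t : List Int) (d : PySem.Dict Int Int) (b : Int)
    (hd : ∀ s : Int, d.getD s 0 = (t.count s : Int)) :
    (l.foldl pvUpd (d, b)).2 = pvMF (fun v => (((t ++ l).count v : Int))) l b := by
  induction l generalizing t d b with
  | nil => rfl
  | cons s l ih =>
      simp only [List.foldl_cons, pvMF]
      have hstep : pvUpd (d, b) s
          = (d.insert s ((t.count s : Int) + 1), max b ((t.count s : Int) + 1)) := by
        simp only [pvUpd, hd s]
        congr 1
        split <;> omega
      rw [hstep]
      have hd' : ∀ v : Int, (d.insert s ((t.count s : Int) + 1)).getD v 0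
          = ((t ++ [s]).count v : Int) := by
        intro v
        rw [PySem.Dict.getD_insert]
        by_cases hv : v = s
        · subst hv; simp [List.count_append]
        · simp [hv, hd v, List.count_append, Ne.symm hv]
      have := ih (t ++ [s]) _ (max b ((t.count s : Int) + 1)) hd'
      rw [this]
      have hlist : t ++ [s] ++ l = t ++ s :: l := by simp
      rw [hlist]
      -- both sides are pvMF over l from different starts; compare via pvMF_max_out
      have hcnt : ((t ++ s :: l).count s : Int) = (t.count s : Int) + 1 + (l.count s : Int) := by
        simp [List.count_append]; omega
      by_cases hz : l.count s = 0
      · simp only [pvMF]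
        congr 1
        rw [hcnt, hz]; omega
      · have hmem : s ∈ l := by
          rcases List.count_pos_iff.mp (Nat.pos_of_ne_zero hz) with h; exact h
        have hle := pvMF_le_of_mem (fun v => ((t ++ s :: l).count v : Int)) l b s hmem
        have e1 := pvMF_max_out (fun v => ((t ++ s :: l).count v : Int)) l b ((t.count s : Int) + 1)
        have e2 := pvMF_max_out (fun v => ((t ++ s :: l).count v : Int)) l b ((t ++ s :: l).count s : Int)
        simp only [pvMF] at e1 e2 hle ⊢
        rw [e1, e2]
        have hpos : 1 ≤ l.count s := Nat.pos_of_ne_zero hz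
        have hlt : ((t.count s : Int) + 1) ≤ ((t ++ s :: l).count s : Int) := by
          rw [hcnt]; omega
        rw [max_eq_left (le_trans hlt hle), max_eq_left hle]

-- B computes the same normal form
lemma pvB_eq (arr : List Int) :
    max_arithmetic_sequences_alt arr
      = pvMF (fun v => ((pvEvens arr).count v : Int)) (pvEvens arr) 0 := by
  have h1 : max_arithmetic_sequences_alt arr
      = ((pvSums arr).foldl (fun st s =>
          if PySem.Int.mod s 2 = 0 then pvUpd st s else st)
          ((PySem.Dict.empty : PySem.Dict Int Int), 0)).2 := by
    simp only [max_arithmetic_sequences_alt, pvPairs, pvSums, pvSum, pvBStep,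
      List.foldl_flatMap, List.foldl_map]
  rw [h1]
  have h2 : ∀ (st : PySem.Dict Int Int × Int) (s : Int),
      (if PySem.Int.mod s 2 = 0 then pvUpd st s else st)
      = (if (PySem.Int.mod s 2 == 0) then pvUpd st s else st) := by
    intro st s; by_cases h : PySem.Int.mod s 2 = 0 <;> simp
  simp only [h2]
  have h3 : ((pvSums arr).foldl (fun st s =>
      if (PySem.Int.mod s 2 == 0) then pvUpd st s else st)
      ((PySem.Dict.empty : PySem.Dict Int Int), 0)).2
      = ((pvEvens arr).foldl pvUpd ((PySem.Dict.empty : PySem.Dict Int Int), 0)).2 := by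
    rw [pvEvens, List.foldl_filter]
  rw [h3]
  have := pvRun (pvEvens arr) [] (PySem.Dict.empty : PySem.Dict Int Int) 0
    (by intro s; simp [PySem.Dict.getD_empty])
  simpa using this

-- ===== VERDICT (by name: the statement is the Claim_ definition above) =====
theorem max_arithmetic_sequences_spec : Claim_equal_max_arithmetic_sequences := by
  intro arr _
  unfold Spec_max_arithmetic_sequences
  rw [pvA_eq, pvB_eq]
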